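-- pv_equiv track=rewrite | github.com/Shyclops/Projects | PythonAssignment/1.py | opish
-- ===== SOURCE A (Python) =====
-- def opish(a):
--     vowelPrevious = True                            #Assumes that the letter before the first is a vowel
--     keyword = "op"                                  #The keyword that will be added to the code will be 'op'
--     output = ""                                     #This is an empty string that the code will be put into
--     for i in a:                                     #cycle through the string index by index
--         if i == 'a' or i == 'e' or i == 'i' \
--             or i == 'o' or i == 'u':                #check if current letter is a vowel
--             if vowelPrevious == False:              #if the previous letter was a consonant
--                 output = output + keyword           #add the keyword to the string as a string of consonants just ended
--                 vowelPrevious = True                #when the program looks again, the last letter will have been a vowel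
--         else:                                       #if it is a consonant
--             vowelPrevious = False                   #on the next loop the previous letter is not a vowel
--         output = output + i                         #add the letter to the output
--     if vowelPrevious == False:                      #if the previous letter was not a vowel
--         output = output + keyword                   #add the keyword if the only letter in the string is a vowel
--     return output                                   #return the coded string
-- ===== SOURCE B (Python) =====
-- import re
--
-- def opish(a):
--     # run-based: append "op" after each maximal run of non-vowel characters
--     return re.sub(r'[^aeiou]+', lambda m: m.group() + 'op', a)
-- ===== Notes on version B (the rewrite author's own statement) =====
-- stated objective: idiomatic
-- what changed: Replaced the character-by-character vowelPrevious state machine with a single regex substitution that appends the keyword to each maximal run of non-vowel characters.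
import Mathlib
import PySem

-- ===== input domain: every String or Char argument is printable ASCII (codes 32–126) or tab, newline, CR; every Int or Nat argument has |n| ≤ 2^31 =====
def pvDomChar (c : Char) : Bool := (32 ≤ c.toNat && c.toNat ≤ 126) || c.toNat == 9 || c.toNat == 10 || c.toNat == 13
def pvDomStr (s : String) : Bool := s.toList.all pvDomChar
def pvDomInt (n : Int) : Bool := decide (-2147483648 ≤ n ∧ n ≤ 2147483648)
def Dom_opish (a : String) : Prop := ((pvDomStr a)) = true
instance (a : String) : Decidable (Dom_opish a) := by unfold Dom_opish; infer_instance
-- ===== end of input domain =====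

-- B appends "op" to each maximal non-vowel run via one regex substitution instead of A's per-character state machine (objective: idiomatic).

def pvVowel (c : Char) : Bool := c == 'a' || c == 'e' || c == 'i' || c == 'o' || c == 'u'

-- ===== PORT A =====
-- A's loop over the string, carrying (vowelPrevious, output); final "op" append when the loop ends on a consonant.
def opishGo (vp : Bool) (out : List Char) : List Char → List Char
  | [] => if vp = false then out ++ ['o', 'p'] else out
  | c :: cs =>
    if pvVowel c then
      if vp = false then opishGo true (out ++ ['o', 'p'] ++ [c]) cs
      else opishGo vp (out ++ [c]) cs
    else opishGo false (out ++ [c]) cs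

def opish (a : String) : String := String.mk (opishGo true [] a.toList)

-- ===== PORT B =====
-- port of Source B's regex sub r'[^aeiou]+' → match + 'op': take each maximal non-vowel run, emit it followed by "op"; vowels pass through.
def opishRuns : List Char → List Char
  | [] => []
  | c :: cs =>
    if pvVowel c then c :: opishRuns cs
    else ((c :: cs).takeWhile (fun x => !pvVowel x)) ++ ['o', 'p'] ++
         opishRuns ((c :: cs).dropWhile (fun x => !pvVowel x))
termination_by l => l.length
decreasing_by
  · simp
  · rename_i h
    have := List.length_dropWhile_le (fun x => !pvVowel x) cs
    simp [List.dropWhile, h]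
    omega

def opish_alt (a : String) : String := String.mk (opishRuns a.toList)



-- ===== PRECONDITION & SPEC =====
def Spec_opish (a : String) (out : String) : Prop := out = opish_alt a
instance (a : String) (out : String) : Decidable (Spec_opish a out) := by unfold Spec_opish; infer_instance

-- ===== CLAIM (what is proved, stated in full; the proofs are below) =====
def Claim_equal_opish : Prop := ∀ (a : String), Dom_opish a → Spec_opish a (opish a)

-- ===== LEMMAS AND PROOFS =====
theorem opishRuns_cons (c : Char) (cs : List Char) (h : ¬ pvVowel c = true) :
    opishRuns (c :: cs) = (c :: cs).takeWhile (fun x => !pvVowel x) ++ ['o', 'p'] ++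
      opishRuns ((c :: cs).dropWhile (fun x => !pvVowel x)) := by rw [opishRuns.eq_def]; simp [h]

theorem opishRuns_nil : opishRuns [] = [] := by rw [opishRuns]

theorem opishRuns_vowel (c : Char) (cs : List Char) (h : pvVowel c = true) :
    opishRuns (c :: cs) = c :: opishRuns cs := by rw [opishRuns.eq_def]; simp [h]

-- B's output for a suffix that starts inside a consonant run (the part of the run already emitted is in `out`).
def consCont : List Char → List Char
  | [] => ['o', 'p']
  | c :: cs => if pvVowel c then 'o' :: 'p' :: opishRuns (c :: cs) else c :: consCont cs

theorem consCont_eq (l : List Char) :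
    consCont l = l.takeWhile (fun x => !pvVowel x) ++ ['o', 'p'] ++ opishRuns (l.dropWhile (fun x => !pvVowel x)) := by
  induction l with
  | nil => simp [consCont, opishRuns_nil]
  | cons c cs ih =>
    by_cases h : pvVowel c
    · simp [consCont, h, List.takeWhile, List.dropWhile]
    · simp [consCont, h, List.takeWhile, List.dropWhile, ih]

theorem opishGo_eq (l : List Char) : ∀ out : List Char,
    opishGo true out l = out ++ opishRuns l ∧ opishGo false out l = out ++ consCont l := by
  induction l with
  | nil => intro out; simp [opishGo, opishRuns_nil, consCont]
  | cons c cs ih =>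
    intro out
    by_cases h : pvVowel c
    · constructor
      · simp [opishGo, h, opishRuns_vowel c cs h, (ih (out ++ [c])).1]
      · simp [opishGo, h, (ih (out ++ ['o', 'p', c])).1, consCont, opishRuns_vowel c cs h]
    · have hr : opishRuns (c :: cs) = c :: consCont cs := by
        rw [opishRuns_cons c cs h]
        simp [List.takeWhile, List.dropWhile, h, consCont_eq]
      constructor
      · simp [opishGo, h, (ih (out ++ [c])).2, hr]
      · simp [opishGo, h, (ih (out ++ [c])).2, consCont]

-- ===== VERDICT (by name: the statement is the Claim_ definition above) =====
theorem opish_spec : Claim_equal_opish := by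
  intro a _
  unfold Spec_opish opish opish_alt
  rw [(opishGo_eq a.toList []).1]
  simp
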